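-- pv_equiv track=rewrite | github.com/lordbernardo27/LinkCraftor | backend/server/engine/extract_rb2.py | _build_joined_and_ranges
-- ===== SOURCE A (Python) =====
-- from typing import Any, Dict, List, Optional, Tuple
--
-- def _build_joined_and_ranges(paras: List[str]) -> Tuple[str, List[Tuple[int, int]]]:
--     """
--     joinedText = para0 + "\n\n" + para1 + ...
--     ranges[i] = (charStart, charEnd) in joinedText (charEnd exclusive)
--     """
--     ranges: List[Tuple[int, int]] = []
--     parts: List[str] = []
--     offset = 0
--     for i, p in enumerate(paras):
--         if i > 0:
--             parts.append("\n\n")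
--             offset += 2
--         start = offset
--         parts.append(p)
--         offset += len(p)
--         end = offset
--         ranges.append((start, end))
--     return "".join(parts), ranges
-- ===== SOURCE B (Python) =====
-- from typing import List, Tuple
--
-- def _build_joined_and_ranges(paras: List[str]) -> Tuple[str, List[Tuple[int, int]]]:
--     if not paras:
--         return "", []
--     total = sum(map(len, paras)) + 2 * (len(paras) - 1)
--     ranges: List[Tuple[int, int]] = []
--     end = total
--     for p in reversed(paras):
--         ranges.append((end - len(p), end))
--         end -= len(p) + 2
--     ranges.reverse()
--     return "\n\n".join(paras), ranges
-- ===== Notes on version B (the rewrite author's own statement) =====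
-- stated objective: alternative
-- what changed: B computes the total joined length up front, then assigns each range back-to-front from its exclusive end while walking reversed(paras), reversing the list at the close and joining with a single str.join, instead of A's forward pass that accumulates a parts list and a running start offset.
import Mathlib
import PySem

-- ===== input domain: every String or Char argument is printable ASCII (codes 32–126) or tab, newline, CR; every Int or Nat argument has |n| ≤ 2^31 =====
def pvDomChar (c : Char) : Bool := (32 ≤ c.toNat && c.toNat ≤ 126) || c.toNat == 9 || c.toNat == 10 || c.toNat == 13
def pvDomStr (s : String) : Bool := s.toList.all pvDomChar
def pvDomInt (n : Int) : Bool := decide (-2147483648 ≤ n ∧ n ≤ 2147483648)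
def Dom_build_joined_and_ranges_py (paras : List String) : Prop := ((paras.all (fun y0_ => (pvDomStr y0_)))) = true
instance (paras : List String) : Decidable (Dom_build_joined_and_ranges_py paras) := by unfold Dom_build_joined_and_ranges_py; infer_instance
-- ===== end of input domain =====

-- B computes the total length first and assigns ranges back-to-front from each end over reversed(paras), joining with one str.join; A runs a forward parts-and-offset pass; objective: alternative.


-- ===== PORT A =====
-- loop body of A's for-loop over enumerate(paras); state = (ranges, parts, offset)
def aStep (st : List (Int × Int) × List String × Int) (ip : Int × String) :
    List (Int × Int) × List String × Int :=
  let po := if ip.1 > 0 then (st.2.1 ++ ["\n\n"], st.2.2 + 2) else (st.2.1, st.2.2)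
  let start := po.2
  let parts := po.1 ++ [ip.2]
  let offset := po.2 + PySem.Str.len ip.2
  (st.1 ++ [(start, offset)], parts, offset)

def build_joined_and_ranges_py (paras : List String) : String × (List (Int × Int)) :=
  let st := (PySem.List.enumerate paras).foldl aStep ([], [], 0)
  (PySem.Str.join "" st.2.1, st.1)

-- ===== PORT B =====
-- loop body of B's reversed pass; state = (ranges, end)
def bStep (st : List (Int × Int) × Int) (p : String) : List (Int × Int) × Int :=
  (st.1 ++ [(st.2 - PySem.Str.len p, st.2)], st.2 - (PySem.Str.len p + 2))

def build_joined_and_ranges_py_alt (paras : List String) : String × (List (Int × Int)) :=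
  if paras = [] then ("", [])
  else
    let total : Int := (paras.map PySem.Str.len).sum + 2 * ((paras.length : Int) - 1)
    let st := paras.reverse.foldl bStep ([], total)
    (PySem.Str.join "\n\n" paras, st.1.reverse)

-- ===== PRECONDITION & SPEC =====
def Spec_build_joined_and_ranges_py (paras : List String) (out : String × (List (Int × Int))) : Prop := out = build_joined_and_ranges_py_alt paras
instance (paras : List String) (out : String × (List (Int × Int))) : Decidable (Spec_build_joined_and_ranges_py paras out) := by unfold Spec_build_joined_and_ranges_py; infer_instance

-- ===== CLAIM (what is proved, stated in full; the proofs are below) =====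
def Claim_equal_build_joined_and_ranges_py : Prop := ∀ (paras : List String), Dom_build_joined_and_ranges_py paras → Spec_build_joined_and_ranges_py paras (build_joined_and_ranges_py paras)

-- ===== LEMMAS AND PROOFS =====

/-- the ranges, written as a forward recursion with a starting position -/
def rangesFrom : List String → Int → List (Int × Int)
  | [], _ => []
  | p :: rest, pos => (pos, pos + PySem.Str.len p) :: rangesFrom rest (pos + PySem.Str.len p + 2)

/-- "\n\n" interleaved before every element (char-list level) -/
def inter : List (List Char) → List (List Char)
  | [] => []
  | q :: r => ['\n', '\n'] :: q :: inter r

theorem afold (ps : List String) : ∀ (s : Int), 1 ≤ s →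
    ∀ (ranges : List (Int × Int)) (parts : List String) (offset : Int),
    ((PySem.List.enumerate ps s).foldl aStep (ranges, parts, offset)) =
      (ranges ++ rangesFrom ps (offset + 2),
        parts ++ (inter (ps.map String.toList)).map String.ofList,
        offset + 2 + PySem.Str.len (String.ofList ((ps.map String.toList).flatten)) + 2 * (ps.length - 1)) ∨ ps = [] := by
  induction ps with
  | nil => intro s hs ranges parts offset; right; rfl
  | cons p rest ih =>
      intro s hs ranges parts offset
      left
      rw [PySem.List.enumerate_cons, List.foldl_cons]
      have hstep : aStep (ranges, parts, offset) (s, p) =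
          (ranges ++ [(offset + 2, offset + 2 + PySem.Str.len p)],
           parts ++ ["\n\n", p], offset + 2 + PySem.Str.len p) := by
        simp [aStep, show s > 0 by omega]
      rw [hstep]
      rcases ih (s + 1) (by omega) (ranges ++ [(offset + 2, offset + 2 + PySem.Str.len p)])
          (parts ++ ["\n\n", p]) (offset + 2 + PySem.Str.len p) with h | h
      · rw [h]
        refine Prod.ext ?_ (Prod.ext ?_ ?_) <;> simp [rangesFrom, inter, PySem.Str.len]
        ring
      · subst h
        simp [rangesFrom, inter, PySem.Str.len]

theorem afold_nil_eval (ranges : List (Int × Int)) (parts : List String) (offset : Int) :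
    (PySem.List.enumerate ([] : List String) 1).foldl aStep (ranges, parts, offset) = (ranges, parts, offset) := rfl

theorem join_inter (p : List Char) (rest : List (List Char)) :
    PySem.Chars.join [] (p :: inter rest) = PySem.Chars.join ['\n', '\n'] (p :: rest) := by
  induction rest generalizing p with
  | nil => rfl
  | cons q r ih =>
      show PySem.Chars.join [] (p :: ['\n','\n'] :: q :: inter r) = _
      rw [PySem.Chars.join_cons_cons, PySem.Chars.join_cons_cons,
          PySem.Chars.join_cons_cons ['\n','\n'] p q r, ih]
      simp

/-- A computes the "\n\n"-join and the forward ranges from 0 -/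
theorem a_eq (paras : List String) :
    build_joined_and_ranges_py paras = (PySem.Str.join "\n\n" paras, rangesFrom paras 0) := by
  unfold build_joined_and_ranges_py
  dsimp only
  cases paras with
  | nil => rfl
  | cons p rest =>
      rw [PySem.List.enumerate_cons, List.foldl_cons]
      have hstep : aStep (([] : List (Int × Int)), ([] : List String), (0 : Int)) (0, p) =
          ([(0, PySem.Str.len p)], [p], PySem.Str.len p) := by
        simp [aStep]
      rw [hstep, show (0:Int)+1 = 1 by norm_num]
      rcases afold rest 1 (by omega) [(0, PySem.Str.len p)] [p] (PySem.Str.len p) with h | h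
      · rw [h]
        refine Prod.ext ?_ ?_
        · show PySem.Str.join "" ([p] ++ (inter (rest.map String.toList)).map String.ofList)
              = PySem.Str.join "\n\n" (p :: rest)
          unfold PySem.Str.join
          congr 1
          have hm : ([p] ++ (inter (rest.map String.toList)).map String.ofList).map String.toList
              = p.toList :: inter (rest.map String.toList) := by
            simp [Function.comp_def, String.toList_ofList]
          rw [hm]
          have hsep : ("\n\n" : String).toList = ['\n', '\n'] := by decide
          have hsep0 : ("" : String).toList = [] := by decide
          rw [hsep0, hsep, join_inter]
          rfl
        · simp [rangesFrom]
      · subst h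
        rw [afold_nil_eval]
        refine Prod.ext ?_ ?_
        · show PySem.Str.join "" [p] = PySem.Str.join "\n\n" [p]
          unfold PySem.Str.join PySem.Chars.join
          simp [List.intercalate]
        · simp [rangesFrom]

/-- suffix ranges produced by B's reversed loop -/
def backList : List String → Int → List (Int × Int)
  | [], _ => []
  | p :: r, e => (e - PySem.Str.len p, e) :: backList r (e - (PySem.Str.len p + 2))

/-- width each paragraph contributes (its length plus the separator) -/
def off : List String → Int
  | [] => 0
  | p :: r => PySem.Str.len p + 2 + off r

theorem bfold (qs : List String) : ∀ (acc : List (Int × Int)) (e : Int),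
    (qs.foldl bStep (acc, e)).1 = acc ++ backList qs e := by
  induction qs with
  | nil => intro acc e; simp [backList]
  | cons p r ih => intro acc e; simp [bStep, backList, ih]

theorem off_append (xs : List String) (p : String) :
    off (xs ++ [p]) = off xs + PySem.Str.len p + 2 := by
  induction xs with
  | nil => simp [off]
  | cons q r ih => simp [off, ih]; ring

theorem rangesFrom_append (ps : List String) (p : String) : ∀ (pos : Int),
    rangesFrom (ps ++ [p]) pos
      = rangesFrom ps pos ++ [(pos + off ps, pos + off ps + PySem.Str.len p)] := by
  induction ps with
  | nil => intro pos; simp [rangesFrom, off]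
  | cons q r ih =>
      intro pos
      simp only [List.cons_append, rangesFrom, ih, off]
      rw [show pos + PySem.Str.len q + 2 + off r = pos + (PySem.Str.len q + 2 + off r) from by ring]

theorem back_eq (qs : List String) : ∀ (e : Int),
    (backList qs e).reverse = rangesFrom qs.reverse (e - off qs.reverse + 2) := by
  induction qs with
  | nil => intro e; rfl
  | cons p r ih =>
      intro e
      simp only [backList, List.reverse_cons, ih, rangesFrom_append, off_append]
      congr 2 <;> ring

theorem off_eq (ps : List String) : off ps = (ps.map PySem.Str.len).sum + 2 * (ps.length : Int) := by
  induction ps with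
  | nil => simp [off]
  | cons p r ih => simp [off, ih]; ring

/-- B computes the same pair -/
theorem b_eq (paras : List String) :
    build_joined_and_ranges_py_alt paras = (PySem.Str.join "\n\n" paras, rangesFrom paras 0) := by
  unfold build_joined_and_ranges_py_alt
  by_cases h : paras = []
  · subst h
    refine Prod.ext ?_ rfl
    show ("" : String) = PySem.Str.join "\n\n" []
    rfl
  · rw [if_neg h]
    refine Prod.ext rfl ?_
    show ((paras.reverse.foldl bStep ([], (paras.map PySem.Str.len).sum + 2 * ((paras.length : Int) - 1))).1).reverse
        = rangesFrom paras 0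
    rw [bfold, List.nil_append, back_eq, List.reverse_reverse, off_eq]
    congr 1
    ring

-- ===== VERDICT (by name: the statement is the Claim_ definition above) =====
theorem build_joined_and_ranges_py_spec : Claim_equal_build_joined_and_ranges_py := by
  intro paras _
  unfold Spec_build_joined_and_ranges_py
  rw [a_eq, b_eq]
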